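-- pv_equiv track=rewrite | github.com/LyeosMaouli/lm-video-subtitler | modules/mcp_client.py | _create_translated_srt
-- ===== SOURCE A (Python) =====
-- from typing import List, Dict, Optional, Any
--
-- def _create_translated_srt(original_content: str, translated_texts: List[str]) -> str:
--     """Create translated SRT content with original timestamps."""
--     lines = original_content.strip().split('\n')
--     translated_lines = []
--     text_index = 0
--
--     i = 0
--     while i < len(lines):
--         line = lines[i].strip()
--
--         if not line:
--             translated_lines.append(line)
--             i += 1
--             continue
--
--         if line.isdigit() or '-->' in line:
--             # Keep timestamp and numbering
--             translated_lines.append(line)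
--             i += 1
--             continue
--
--         # Replace subtitle text with translation
--         if text_index < len(translated_texts) and translated_texts[text_index]:
--             translated_lines.append(translated_texts[text_index])
--             text_index += 1
--         else:
--             # Keep original if translation failed
--             translated_lines.append(line)
--             text_index += 1
--
--         i += 1
--
--     return '\n'.join(translated_lines)
-- ===== SOURCE B (Python) =====
-- def _create_translated_srt(original_content, translated_texts):
--     """Create translated SRT content with original timestamps."""
--     stripped = [ln.strip() for ln in original_content.strip().split('\n')]
--     text_positions = [i for i, s in enumerate(stripped)
--                       if s and not s.isdigit() and '-->' not in s]
--     out = list(stripped)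
--     for j, pos in enumerate(text_positions):
--         if j < len(translated_texts) and translated_texts[j]:
--             out[pos] = translated_texts[j]
--     return '\n'.join(out)
-- ===== Notes on version B (the rewrite author's own statement) =====
-- stated objective: alternative
-- what changed: A's single interleaved while-loop carrying a text_index counter is replaced by a staged pipeline: one pass strips and classifies the lines collecting the list of text-line positions, then a second pass writes translations into a copy of the stripped lines by random-access index assignment, then join.
import Mathlib
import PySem

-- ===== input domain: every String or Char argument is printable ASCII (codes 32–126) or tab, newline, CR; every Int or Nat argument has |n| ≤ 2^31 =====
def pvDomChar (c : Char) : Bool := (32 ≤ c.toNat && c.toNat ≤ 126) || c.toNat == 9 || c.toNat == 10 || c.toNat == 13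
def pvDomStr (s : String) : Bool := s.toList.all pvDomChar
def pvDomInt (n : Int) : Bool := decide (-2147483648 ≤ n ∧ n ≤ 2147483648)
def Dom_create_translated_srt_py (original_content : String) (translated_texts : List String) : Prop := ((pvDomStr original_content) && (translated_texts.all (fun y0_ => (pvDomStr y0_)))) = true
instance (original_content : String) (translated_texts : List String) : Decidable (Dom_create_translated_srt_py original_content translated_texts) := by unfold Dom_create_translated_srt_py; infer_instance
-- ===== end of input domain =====

-- B replaces A's interleaved counter loop by staged passes: classify and collect text-line
-- positions, then write translations into a copy by index assignment; objective 'alternative'.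

-- ===== PORT A =====
-- A's while loop over the lines, carrying text_index; step-for-step transliteration.
def pvA_go (tts : List String) : List String → Nat → List String
  | [], _ => []
  | l :: rest, ti =>
    let line := PySem.Str.strip l
    if line = "" then
      line :: pvA_go tts rest ti
    else if PySem.Str.strIsdigit line || PySem.Str.isIn "-->" line then
      line :: pvA_go tts rest ti
    else if ti < tts.length ∧ tts.getD ti "" ≠ "" then
      tts.getD ti "" :: pvA_go tts rest (ti + 1)
    else
      line :: pvA_go tts rest (ti + 1)

def create_translated_srt_py (original_content : String) (translated_texts : List String) : String :=
  let lines := (PySem.Str.split? (PySem.Str.strip original_content) "\n").getD []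
  PySem.Str.join "\n" (pvA_go translated_texts lines 0)

-- ===== PORT B =====
-- Source B's classification predicate: non-empty, not isdigit, no '-->'.
def pvB_isText (s : String) : Bool :=
  s != "" && !PySem.Str.strIsdigit s && !PySem.Str.isIn "-->" s

-- Source B's for-loop body: out[pos] = translated_texts[j] under the guard.
def pvB_step (tts : List String) (out : List String) (jp : Int × Int) : List String :=
  if jp.1 < (tts.length : Int) ∧ PySem.List.pyGetD tts jp.1 "" ≠ "" then
    PySem.List.pySetD out jp.2 (PySem.List.pyGetD tts jp.1 "")
  else out

def create_translated_srt_py_alt (original_content : String) (translated_texts : List String) : String :=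
  let stripped := ((PySem.Str.split? (PySem.Str.strip original_content) "\n").getD []).map PySem.Str.strip
  let text_positions := (PySem.List.enumerate stripped).filterMap
      (fun p => if pvB_isText p.2 then some p.1 else none)
  let out := (PySem.List.enumerate text_positions).foldl (pvB_step translated_texts) stripped
  PySem.Str.join "\n" out

-- ===== PRECONDITION & SPEC =====
def Spec_create_translated_srt_py (original_content : String) (translated_texts : List String) (out : String) : Prop := out = create_translated_srt_py_alt original_content translated_texts
instance (original_content : String) (translated_texts : List String) (out : String) : Decidable (Spec_create_translated_srt_py original_content translated_texts out) := by unfold Spec_create_translated_srt_py; infer_instance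

-- ===== CLAIM =====
def Claim_equal_create_translated_srt_py : Prop := ∀ (original_content : String) (translated_texts : List String), Dom_create_translated_srt_py original_content translated_texts → Spec_create_translated_srt_py original_content translated_texts (create_translated_srt_py original_content translated_texts)

-- ===== LEMMAS AND PROOFS =====

-- Proof-side middle form: consume the remaining translations head-first along the stripped lines.
def pvMid : List String → List String → List String
  | [], _ => []
  | s :: rest, tts =>
    if pvB_isText s then
      match tts with
      | [] => s :: pvMid rest []
      | t :: more => (if t = "" then s else t) :: pvMid rest more
    else
      s :: pvMid rest tts

-- A's counter loop at text_index ti equals the middle form on the remaining translations.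
theorem pvA_go_eq_pvMid (tts : List String) (ls : List String) (ti : Nat) :
    pvA_go tts ls ti = pvMid (ls.map PySem.Str.strip) (tts.drop ti) := by
  induction ls generalizing ti with
  | nil => simp [pvA_go, pvMid]
  | cons l rest ih =>
    simp only [pvA_go, List.map_cons, pvMid, pvB_isText]
    by_cases h0 : PySem.Str.strip l = ""
    · simp [h0, ih ti]
    · by_cases h1 : (PySem.Str.strIsdigit (PySem.Str.strip l) || PySem.Str.isIn "-->" (PySem.Str.strip l)) = true
      · rcases Bool.or_eq_true_iff.mp h1 with h | h <;> simp at h <;> simp [h0, h, ih ti]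
      · rw [Bool.or_eq_true_iff] at h1
        push Not at h1
        have hd : PySem.Str.strIsdigit (PySem.Str.strip l) = false := Bool.eq_false_iff.mpr h1.1
        have hi : PySem.Str.isIn "-->" (PySem.Str.strip l) = false := Bool.eq_false_iff.mpr h1.2
        simp at hd hi
        by_cases hlt : ti < tts.length
        · rw [List.drop_eq_getElem_cons hlt]
          by_cases he : tts[ti] = ""
          · simp [h0, hd, hi, hlt, he, ih (ti + 1)]
          · simp [h0, hd, hi, hlt, he, ih (ti + 1)]
        · have hnil : tts.drop ti = [] := List.drop_eq_nil_of_le (Nat.le_of_not_lt hlt)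
          have hnil' : tts.drop (ti + 1) = [] := List.drop_eq_nil_of_le (by omega)
          simp [h0, hd, hi, hlt, hnil, ih (ti + 1), hnil']

-- The positions list of Source B, parameterised by the enumeration start.
def pvPosFrom (s : Int) (ss : List String) : List Int :=
  (PySem.List.enumerate ss s).filterMap (fun p => if pvB_isText p.2 then some p.1 else none)

theorem pvPosFrom_nil (s : Int) : pvPosFrom s [] = [] := rfl

theorem pvPosFrom_cons (s : Int) (x : String) (xs : List String) :
    pvPosFrom s (x :: xs) =
      (if pvB_isText x then [s] else []) ++ pvPosFrom (s + 1) xs := by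
  simp only [pvPosFrom, PySem.List.enumerate_cons, List.filterMap_cons]
  by_cases h : pvB_isText x <;> simp [h]

-- B's write loop, generalised: with a processed prefix `pre` in the accumulator and
-- j0 translations already consumed, it produces `pre ++` the middle form on the rest.
theorem pvB_fold_eq_pvMid (ss : List String) (tts : List String) (pre : List String) (j0 : Nat) :
    (PySem.List.enumerate (pvPosFrom (pre.length : Int) ss) (j0 : Int)).foldl
        (pvB_step tts) (pre ++ ss)
      = pre ++ pvMid ss (tts.drop j0) := by
  induction ss generalizing pre j0 tts with
  | nil => simp [pvPosFrom_nil, pvMid]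
  | cons s rest ih =>
    rw [pvPosFrom_cons]
    by_cases ht : pvB_isText s
    · simp only [ht, if_true, List.singleton_append, PySem.List.enumerate_cons, List.foldl_cons]
      have hstep : pvB_step tts (pre ++ s :: rest) ((j0 : Int), (pre.length : Int))
          = pre ++ (match tts.drop j0 with
                    | [] => s
                    | t :: _ => if t = "" then s else t) :: rest := by
        unfold pvB_step
        by_cases hlt : j0 < tts.length
        · have hget : PySem.List.pyGetD tts (j0 : Int) "" = tts[j0] := by
            simp [PySem.List.pyGetD_natCast, List.getD_eq_getElem?_getD, hlt]
          rw [List.drop_eq_getElem_cons hlt]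
          by_cases he : tts[j0] = ""
          · simp [hget, he, hlt]
          · have : (PySem.List.pySetD (pre ++ s :: rest) (pre.length : Int) tts[j0])
                = pre ++ tts[j0] :: rest := by
              rw [PySem.List.pySetD_natCast]
              simp
            simp [hget, he, hlt, this]
        · have hnil : tts.drop j0 = [] := List.drop_eq_nil_of_le (Nat.le_of_not_lt hlt)
          have : ¬ ((j0 : Int) < (tts.length : Int)) := by exact_mod_cast hlt
          simp [hnil, this]
      rw [hstep]
      have hlen : ((pre.length : Int) + 1) = (((pre ++ [match tts.drop j0 with
                    | [] => s
                    | t :: _ => if t = "" then s else t]).length : Nat) : Int) := by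
        simp
      have hassoc : ∀ (x : String), pre ++ x :: rest = (pre ++ [x]) ++ rest := by
        intro x; simp
      rw [hassoc, hlen]
      have : ((j0 : Int) + 1) = ((j0 + 1 : Nat) : Int) := by push_cast; ring
      rw [this, ih]
      cases hdrop : tts.drop j0 with
      | nil =>
        have : tts.drop (j0 + 1) = [] := by
          have := List.drop_eq_nil_iff.mp hdrop
          exact List.drop_eq_nil_of_le (by omega)
        simp [pvMid, ht, this]
      | cons t more =>
        have : tts.drop (j0 + 1) = more := by
          have h2 := congrArg (List.drop 1) hdrop
          rw [List.drop_drop] at h2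
          simpa using h2
        simp [pvMid, ht, this]
    · simp only [ht, Bool.false_eq_true, if_false, List.nil_append]
      have hassoc : pre ++ s :: rest = (pre ++ [s]) ++ rest := by simp
      have hlen : ((pre.length : Int) + 1) = (((pre ++ [s]).length : Nat) : Int) := by simp
      rw [hassoc, hlen, ih]
      simp [pvMid, ht]

-- ===== VERDICT =====
theorem create_translated_srt_py_spec : Claim_equal_create_translated_srt_py := by
  intro oc tts _
  unfold Spec_create_translated_srt_py create_translated_srt_py create_translated_srt_py_alt
  dsimp only
  have h := pvB_fold_eq_pvMid (((PySem.Str.split? (PySem.Str.strip oc) "\n").getD []).map PySem.Str.strip) tts [] 0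
  simp only [List.nil_append, List.length_nil, Nat.cast_zero, List.drop_zero] at h
  simp only [pvPosFrom] at h
  rw [pvA_go_eq_pvMid]
  simp only [List.drop_zero]
  rw [← h]
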